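-- pv_equiv track=rewrite | github.com/a1426/Rail-Circuit | gate_finder.py | high_low
-- ===== SOURCE A (Python) =====
-- extra_margin=10
--
-- def high_low(value,selection_list, default_height):
--     try:
--         higher = min([element for element in selection_list if element-value > 0])
--     except ValueError:
--         higher=default_height
--     try:
--         lower = max(element for element in selection_list if element-value < 0)
--     except ValueError:
--         lower=0
--     if lower-extra_margin>=0:
--         lower-=extra_margin
--     if higher+extra_margin<=default_height:
--         higher+=extra_margin
--     return lower,higher
-- ===== SOURCE B (Python) =====
-- extra_margin = 10
--
-- def high_low(value, selection_list, default_height):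
--     # sort once, then locate both neighbours by binary search
--     s = sorted(selection_list)
--     n = len(s)
--     # first index with s[i] > value (bisect_right)
--     lo, hi = 0, n
--     while lo < hi:
--         mid = (lo + hi) // 2
--         if s[mid] > value:
--             hi = mid
--         else:
--             lo = mid + 1
--     higher = s[lo] if lo < n else default_height
--     # first index with s[i] >= value (bisect_left)
--     lo2, hi2 = 0, n
--     while lo2 < hi2:
--         mid = (lo2 + hi2) // 2
--         if s[mid] < value:
--             lo2 = mid + 1
--         else:
--             hi2 = mid
--     lower = s[lo2 - 1] if lo2 > 0 else 0
--     if lower - extra_margin >= 0: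
--         lower -= extra_margin
--     if higher + extra_margin <= default_height:
--         higher += extra_margin
--     return lower, higher
-- ===== Notes on version B (the rewrite author's own statement) =====
-- stated objective: alternative
-- what changed: Replaces A's two filtered-comprehension scans with min()/max() under try/except by sort-then-binary-search: sort the list once, then two hand-written binary searches (bisect_right for the nearest element above, bisect_left for the nearest element below), with the same defaults and margin clamps.
import Mathlib
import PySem

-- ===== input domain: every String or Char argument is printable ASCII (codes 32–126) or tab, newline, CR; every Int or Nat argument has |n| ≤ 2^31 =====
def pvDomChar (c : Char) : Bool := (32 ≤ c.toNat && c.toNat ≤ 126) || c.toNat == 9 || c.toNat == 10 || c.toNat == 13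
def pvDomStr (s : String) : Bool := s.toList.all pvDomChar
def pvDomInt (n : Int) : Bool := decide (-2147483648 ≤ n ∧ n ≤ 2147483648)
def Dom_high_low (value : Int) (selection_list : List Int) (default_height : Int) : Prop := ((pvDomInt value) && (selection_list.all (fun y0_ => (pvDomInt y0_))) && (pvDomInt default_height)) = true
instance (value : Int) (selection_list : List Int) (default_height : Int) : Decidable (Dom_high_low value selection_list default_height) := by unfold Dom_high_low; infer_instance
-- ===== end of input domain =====

-- B replaces A's two filtered min()/max() scans with try/except by sort-then-binary-search:
-- sort once, then two hand-written binary searches locate the nearest element above/below.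


-- ===== PORT A =====
-- min([...]) / max(...) with ValueError fallback: PySem.List.min?/max? give none on []
def high_low (value : Int) (selection_list : List Int) (default_height : Int) : Int × Int :=
  let higher :=
    match PySem.List.min? (selection_list.filter (fun element => decide (element - value > 0))) (fun x => x) with
    | some m => m
    | none => default_height
  let lower :=
    match PySem.List.max? (selection_list.filter (fun element => decide (element - value < 0))) (fun x => x) with
    | some m => m
    | none => 0
  let lower := if lower - 10 ≥ 0 then lower - 10 else lower
  let higher := if higher + 10 ≤ default_height then higher + 10 else higher
  (lower, higher)

-- ===== PORT B =====
-- Source B's first while loop: binary search for the first index with s[i] > value.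
-- Fuel-based transliteration (the loop shrinks hi - lo; fuel = n is enough);
-- s[mid]? is always some here since lo < hi ≤ n keeps mid in range.
def hlSearchAbove (s : List Int) (v : Int) : Nat → Nat → Nat → Nat
  | 0, lo, _hi => lo
  | fuel+1, lo, hi =>
    if lo < hi then
      match s[(lo + hi) / 2]? with
      | some y => if y > v then hlSearchAbove s v fuel lo ((lo + hi) / 2)
                  else hlSearchAbove s v fuel ((lo + hi) / 2 + 1) hi
      | none => lo
    else lo

-- Source B's second while loop: binary search for the first index with s[i] ≥ value
def hlSearchBelow (s : List Int) (v : Int) : Nat → Nat → Nat → Nat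
  | 0, lo, _hi => lo
  | fuel+1, lo, hi =>
    if lo < hi then
      match s[(lo + hi) / 2]? with
      | some y => if y < v then hlSearchBelow s v fuel ((lo + hi) / 2 + 1) hi
                  else hlSearchBelow s v fuel lo ((lo + hi) / 2)
      | none => lo
    else lo

def high_low_alt (value : Int) (selection_list : List Int) (default_height : Int) : Int × Int :=
  let s := PySem.List.sorted selection_list (fun x => x) false
  let n := s.length
  let r := hlSearchAbove s value n 0 n
  let higher := if r < n then s.getD r 0 else default_height
  let b := hlSearchBelow s value n 0 n
  let lower := if b > 0 then s.getD (b - 1) 0 else 0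
  let lower := if lower - 10 ≥ 0 then lower - 10 else lower
  let higher := if higher + 10 ≤ default_height then higher + 10 else higher
  (lower, higher)

-- ===== PRECONDITION & SPEC =====
def Spec_high_low (value : Int) (selection_list : List Int) (default_height : Int) (out : Int × Int) : Prop := out = high_low_alt value selection_list default_height
instance (value : Int) (selection_list : List Int) (default_height : Int) (out : Int × Int) : Decidable (Spec_high_low value selection_list default_height out) := by unfold Spec_high_low; infer_instance

-- ===== CLAIM (what is proved, stated in full; the proofs are below) =====
def Claim_equal_high_low : Prop := ∀ (value : Int) (selection_list : List Int) (default_height : Int), Dom_high_low value selection_list default_height → Spec_high_low value selection_list default_height (high_low value selection_list default_height)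

-- ===== LEMMAS AND PROOFS =====

-- B's hand-written loops compute exactly bisect_right / bisect_left
theorem hlSearchAbove_eq (s : List Int) (v : Int) (fuel : Nat) : ∀ (lo hi : Nat),
    hlSearchAbove s v fuel lo hi = PySem.List.bisectRightLoop s v fuel lo hi := by
  induction fuel with
  | zero => intro lo hi; rfl
  | succ f ih =>
      intro lo hi
      rw [hlSearchAbove, PySem.List.bisectRightLoop]
      cases hy : s[(lo + hi) / 2]? <;> simp [ih]

theorem hlSearchBelow_eq (s : List Int) (v : Int) (fuel : Nat) : ∀ (lo hi : Nat),
    hlSearchBelow s v fuel lo hi = PySem.List.bisectLeftLoop s v fuel lo hi := by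
  induction fuel with
  | zero => intro lo hi; rfl
  | succ f ih =>
      intro lo hi
      rw [hlSearchBelow, PySem.List.bisectLeftLoop]
      cases hy : s[(lo + hi) / 2]? <;> simp [ih]

theorem hlSearchAbove_bisect (s : List Int) (v : Int) :
    hlSearchAbove s v s.length 0 s.length = PySem.List.bisectRight s v :=
  hlSearchAbove_eq s v s.length 0 s.length

theorem hlSearchBelow_bisect (s : List Int) (v : Int) :
    hlSearchBelow s v s.length 0 s.length = PySem.List.bisectLeft s v :=
  hlSearchBelow_eq s v s.length 0 s.length

-- min()/max() with identity key is determined by value: any element that is a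
-- lower (upper) bound of the list is THE result
theorem min?_id_eq_some_of (xs : List Int) (m : Int) (hm : m ∈ xs)
    (hmin : ∀ y ∈ xs, m ≤ y) : PySem.List.min? xs (fun x => x) = some m := by
  cases hx : PySem.List.min? xs (fun x => x) with
  | none => rw [PySem.List.min?_eq_none_iff] at hx; subst hx; simp at hm
  | some m' =>
      have h1 := PySem.List.min?_mem hx
      have h2 := PySem.List.min?_isMin hx
      have : m' = m := le_antisymm (h2 m hm) (hmin m' h1)
      rw [this]

theorem max?_id_eq_some_of (xs : List Int) (m : Int) (hm : m ∈ xs)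
    (hmax : ∀ y ∈ xs, y ≤ m) : PySem.List.max? xs (fun x => x) = some m := by
  cases hx : PySem.List.max? xs (fun x => x) with
  | none => rw [PySem.List.max?_eq_none_iff] at hx; subst hx; simp at hm
  | some m' =>
      have h1 := PySem.List.max?_mem hx
      have h2 := PySem.List.max?_isMax hx
      have : m' = m := le_antisymm (hmax m' h1) (h2 m hm)
      rw [this]

theorem min?_id_perm (xs ys : List Int) (h : xs.Perm ys) :
    PySem.List.min? xs (fun x => x) = PySem.List.min? ys (fun x => x) := by
  cases hy : PySem.List.min? ys (fun x => x) with
  | none =>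
      rw [PySem.List.min?_eq_none_iff] at hy
      rw [PySem.List.min?_eq_none_iff]
      rw [hy] at h
      exact h.eq_nil
  | some m =>
      exact min?_id_eq_some_of xs m (h.mem_iff.mpr (PySem.List.min?_mem hy))
        (fun y hyx => PySem.List.min?_isMin hy y (h.mem_iff.mp hyx))

theorem max?_id_perm (xs ys : List Int) (h : xs.Perm ys) :
    PySem.List.max? xs (fun x => x) = PySem.List.max? ys (fun x => x) := by
  cases hy : PySem.List.max? ys (fun x => x) with
  | none =>
      rw [PySem.List.max?_eq_none_iff] at hy
      rw [PySem.List.max?_eq_none_iff]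
      rw [hy] at h
      exact h.eq_nil
  | some m =>
      exact max?_id_eq_some_of xs m (h.mem_iff.mpr (PySem.List.max?_mem hy))
        (fun y hyx => PySem.List.max?_isMax hy y (h.mem_iff.mp hyx))

-- the min over the elements above v is the sorted list's entry at bisect_right
theorem minFilter_above (lst s : List Int) (v : Int) (hperm : s.Perm lst)
    (hpair : s.Pairwise (fun a b => a ≤ b)) :
    PySem.List.min? (lst.filter (fun element => decide (element - v > 0))) (fun x => x)
      = (if h : PySem.List.bisectRight s v < s.length
         then some (s[PySem.List.bisectRight s v]'h) else none) := by
  obtain ⟨hle, hlt, hge⟩ := PySem.List.bisectRight_spec s v hpair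
  have hmono := List.pairwise_iff_getElem.mp hpair
  have hmono' : ∀ i j (hi : i < s.length) (hj : j < s.length), i ≤ j → s[i] ≤ s[j] := by
    intro i j hi hj hij
    rcases Nat.eq_or_lt_of_le hij with rfl | hlt'
    · exact le_refl _
    · exact hmono i j hi hj hlt'
  rw [min?_id_perm _ _ (hperm.filter _).symm]
  split
  · next h =>
      apply min?_id_eq_some_of
      · rw [List.mem_filter]
        refine ⟨List.getElem_mem h, ?_⟩
        have := hge _ h le_rfl
        simp
        omega
      · intro y hy
        rw [List.mem_filter] at hy
        obtain ⟨hymem, hyp⟩ := hy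
        obtain ⟨j, hj, rfl⟩ := List.mem_iff_getElem.mp hymem
        simp at hyp
        by_cases hc : j < PySem.List.bisectRight s v
        · exact absurd (hlt j hj hc) (by omega)
        · exact hmono' _ _ h hj (by omega)
  · next h =>
      rw [PySem.List.min?_eq_none_iff, List.filter_eq_nil_iff]
      intro a ha
      obtain ⟨j, hj, rfl⟩ := List.mem_iff_getElem.mp ha
      have := hlt j hj (by omega)
      simp
      omega

-- the max over the elements below v is the sorted list's entry before bisect_left
theorem maxFilter_below (lst s : List Int) (v : Int) (hperm : s.Perm lst)
    (hpair : s.Pairwise (fun a b => a ≤ b)) :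
    PySem.List.max? (lst.filter (fun element => decide (element - v < 0))) (fun x => x)
      = (if h : 0 < PySem.List.bisectLeft s v
         then some (s[PySem.List.bisectLeft s v - 1]'(by
                obtain ⟨hle, _, _⟩ := PySem.List.bisectLeft_spec s v hpair; omega))
         else none) := by
  obtain ⟨hle, hlt, hge⟩ := PySem.List.bisectLeft_spec s v hpair
  have hmono := List.pairwise_iff_getElem.mp hpair
  have hmono' : ∀ i j (hi : i < s.length) (hj : j < s.length), i ≤ j → s[i] ≤ s[j] := by
    intro i j hi hj hij
    rcases Nat.eq_or_lt_of_le hij with rfl | hlt'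
    · exact le_refl _
    · exact hmono i j hi hj hlt'
  rw [max?_id_perm _ _ (hperm.filter _).symm]
  split
  · next h =>
      have hb1 : PySem.List.bisectLeft s v - 1 < s.length := by omega
      apply max?_id_eq_some_of
      · rw [List.mem_filter]
        refine ⟨List.getElem_mem hb1, ?_⟩
        have := hlt _ hb1 (by omega)
        simp
        omega
      · intro y hy
        rw [List.mem_filter] at hy
        obtain ⟨hymem, hyp⟩ := hy
        obtain ⟨j, hj, rfl⟩ := List.mem_iff_getElem.mp hymem
        simp at hyp
        by_cases hc : PySem.List.bisectLeft s v ≤ j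
        · exact absurd (hge j hj hc) (by omega)
        · exact hmono' _ _ hj hb1 (by omega)
  · next h =>
      rw [PySem.List.max?_eq_none_iff, List.filter_eq_nil_iff]
      intro a ha
      obtain ⟨j, hj, rfl⟩ := List.mem_iff_getElem.mp ha
      have := hge j hj (by omega)
      simp
      omega

-- ===== VERDICT (by name: the statement is the Claim_ definition above) =====
theorem high_low_spec : Claim_equal_high_low := by
  intro v l d _
  unfold Spec_high_low high_low high_low_alt
  dsimp only
  rw [hlSearchAbove_bisect, hlSearchBelow_bisect,
      minFilter_above l (PySem.List.sorted l (fun x => x) false) v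
        (PySem.List.sorted_perm l (fun x => x) false) (PySem.List.sorted_pairwise l (fun x => x)),
      maxFilter_below l (PySem.List.sorted l (fun x => x) false) v
        (PySem.List.sorted_perm l (fun x => x) false) (PySem.List.sorted_pairwise l (fun x => x))]
  have hble := (PySem.List.bisectLeft_spec (PySem.List.sorted l (fun x => x) false) v
    (PySem.List.sorted_pairwise l (fun x => x))).1
  rw [PySem.List.length_sorted] at hble
  by_cases hr : PySem.List.bisectRight (PySem.List.sorted l (fun x => x) false) v < l.length <;>
  by_cases hb : 0 < PySem.List.bisectLeft (PySem.List.sorted l (fun x => x) false) v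
  · have e2 := List.getElem?_eq_getElem
      (show PySem.List.bisectLeft (PySem.List.sorted l (fun x => x) false) v - 1
          < (PySem.List.sorted l (fun x => x) false).length by simp; omega)
    simp [hr, hb, List.getD_eq_getElem?_getD, e2]
  · simp [hr, hb, List.getD_eq_getElem?_getD]
  · have e2 := List.getElem?_eq_getElem
      (show PySem.List.bisectLeft (PySem.List.sorted l (fun x => x) false) v - 1
          < (PySem.List.sorted l (fun x => x) false).length by simp; omega)
    simp [hr, hb, List.getD_eq_getElem?_getD, e2]
  · simp [hr, hb]
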